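-- pv_equiv track=rewrite | github.com/haukuri/aoc | aoc/y2022/d01.py | count_calories
-- ===== SOURCE A (Python) =====
-- def split_batches(text: str):
--     batch = []
--     for line in text.splitlines():
--         line = line.strip()
--         if line == "":
--             if batch:
--                 yield batch
--                 batch = []
--         else:
--             batch.append(line)
--     if batch:
--         yield batch
--
-- def count_calories(input_data: str) -> list[int]:
--     max_sum = 0
--     calories = []
--     for batch in split_batches(input_data):
--         numbers = [int(line) for line in batch]
--         current_sum = sum(numbers)
--         calories.append(current_sum)
--     return calories
-- ===== SOURCE B (Python) =====
-- def count_calories(input_data: str) -> list[int]: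
--     lines = [l.strip() for l in input_data.splitlines()]
--     n = len(lines)
--     calories = []
--     i = 0
--     while i < n:
--         if lines[i]:
--             total = 0
--             while i < n and lines[i]:
--                 total += int(lines[i])
--                 i += 1
--             calories.append(total)
--         else:
--             i += 1
--     return calories
-- ===== Notes on version B (the rewrite author's own statement) =====
-- stated objective: alternative
-- what changed: Replaces A's generator that accumulates each batch as a list of lines (then maps int and sums per yielded batch) with a single index-driven two-level scan over the pre-stripped lines that keeps only a running integer total per batch.
import Mathlib
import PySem

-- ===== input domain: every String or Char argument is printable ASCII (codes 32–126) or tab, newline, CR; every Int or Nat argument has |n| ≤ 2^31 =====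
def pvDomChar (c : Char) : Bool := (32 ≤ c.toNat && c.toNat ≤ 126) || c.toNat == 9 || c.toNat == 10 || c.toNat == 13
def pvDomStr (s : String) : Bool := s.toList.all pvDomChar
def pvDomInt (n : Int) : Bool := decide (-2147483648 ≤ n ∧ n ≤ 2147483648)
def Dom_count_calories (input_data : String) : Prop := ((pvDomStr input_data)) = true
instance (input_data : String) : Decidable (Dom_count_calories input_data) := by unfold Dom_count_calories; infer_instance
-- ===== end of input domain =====

-- B replaces A's generator-plus-batch-list accumulation by an index-driven two-level scan that keeps
-- only a running total per batch (objective: alternative decomposition, same linear cost).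

def pvParse (s : String) : Int := (PySem.Int.ofStr? s).getD 0

-- ===== PORT A =====
-- one step of A's loop body (split_batches interleaved with the consumer): state = (batch, calories)
def pvStepA (st : List String × List Int) (raw : String) : List String × List Int :=
  let line := PySem.Str.strip raw
  if line = "" then
    if st.1 ≠ [] then ([], st.2 ++ [(st.1.map pvParse).sum]) else st
  else (st.1 ++ [line], st.2)

def count_calories (input_data : String) : List Int :=
  let st := (PySem.Str.splitlines input_data).foldl pvStepA ([], [])
  if st.1 ≠ [] then st.2 ++ [(st.1.map pvParse).sum] else st.2

-- ===== PORT B =====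
-- inner while loop: sum the current run of non-blank lines starting at i, return (total, next
-- index).  fuel is a pure totality guard (never exhausted when fuel + i ≥ lines.length).
def pvInner (lines : List String) : Nat → Nat → Int → Int × Nat
  | 0, i, total => (total, i)
  | fuel + 1, i, total =>
    if i < lines.length then
      if lines.getD i "" ≠ "" then
        pvInner lines fuel (i + 1) (total + pvParse (lines.getD i ""))
      else (total, i)
    else (total, i)

-- outer while loop (same fuel discipline)
def pvOuter (lines : List String) : Nat → Nat → List Int
  | 0, _ => []
  | fuel + 1, i =>
    if i < lines.length then
      if lines.getD i "" ≠ "" then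
        let r := pvInner lines lines.length i 0
        r.1 :: pvOuter lines fuel r.2
      else pvOuter lines fuel (i + 1)
    else []

def count_calories_alt (input_data : String) : List Int :=
  let lines := (PySem.Str.splitlines input_data).map PySem.Str.strip
  pvOuter lines lines.length 0

-- ===== PRECONDITION & SPEC =====
-- Pre_ excludes exactly the inputs where a stripped non-blank line is not an int literal:
-- there Python A raises ValueError in int() (and B raises too).
def Pre_count_calories (input_data : String) : Prop :=
  ∀ l ∈ PySem.Str.splitlines input_data,
    PySem.Str.strip l ≠ "" → (PySem.Int.ofStr? (PySem.Str.strip l)).isSome = true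
instance (input_data : String) : Decidable (Pre_count_calories input_data) := by
  unfold Pre_count_calories; infer_instance

def pvWitness_count_calories : String := "1\n 2 \n\n3"

def Spec_count_calories (input_data : String) (out : List Int) : Prop := out = count_calories_alt input_data
instance (input_data : String) (out : List Int) : Decidable (Spec_count_calories input_data out) := by unfold Spec_count_calories; infer_instance

-- ===== CLAIM (what is proved, stated in full; the proofs are below) =====
def Claim_equal_count_calories : Prop := ∀ (input_data : String), Dom_count_calories input_data → Pre_count_calories input_data → Spec_count_calories input_data (count_calories input_data)

-- ===== LEMMAS AND PROOFS =====

-- structural (head-consuming) versions of B's two loops, the bridge between the fold and the index scan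
def pvGoInner (total : Int) : List String → Int × List String
  | [] => (total, [])
  | l :: ls => if l ≠ "" then pvGoInner (total + pvParse l) ls else (total, l :: ls)

theorem pvGoInner_suffix (total : Int) (ls : List String) : (pvGoInner total ls).2 <:+ ls := by
  induction ls generalizing total with
  | nil => simp [pvGoInner]
  | cons l ls ih =>
    by_cases h : l = ""
    · simp [pvGoInner, h]
    · simpa [pvGoInner, h] using (ih (total + pvParse l)).trans (List.suffix_cons l ls)

theorem pvGoInner_cons_lt (total : Int) (l : String) (ls : List String) (h : l ≠ "") :
    (pvGoInner total (l :: ls)).2.length < (l :: ls).length := by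
  have hs := (pvGoInner_suffix (total + pvParse l) ls).length_le
  simp only [pvGoInner, h, ne_eq, not_false_iff, if_true, List.length_cons]
  omega

def pvGoOuter : List String → List Int
  | [] => []
  | l :: ls =>
    if h : l ≠ "" then
      let r := pvGoInner 0 (l :: ls)
      r.1 :: pvGoOuter r.2
    else pvGoOuter ls
termination_by ls => ls.length
decreasing_by
  · exact pvGoInner_cons_lt 0 l ls h
  · simp

-- Bridge 1: with enough fuel, pvInner computes pvGoInner on the suffix starting at i
theorem pvInner_eq_goInner (lines : List String) (fuel i : Nat) (total : Int)
    (hi : i ≤ lines.length) (hf : lines.length ≤ fuel + i) :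
    pvInner lines fuel i total =
      ((pvGoInner total (lines.drop i)).1,
       lines.length - (pvGoInner total (lines.drop i)).2.length) := by
  induction fuel generalizing i total with
  | zero =>
    have : i = lines.length := by omega
    subst this
    simp [pvInner, pvGoInner]
  | succ fuel ih =>
    rcases Nat.lt_or_ge i lines.length with h | h
    · have hdrop : lines.drop i = lines[i] :: lines.drop (i + 1) := (List.getElem_cons_drop h).symm
      have hgd : lines.getD i "" = lines[i] := List.getD_eq_getElem lines "" h
      by_cases hb : lines[i] = ""
      · rw [pvInner, if_pos h, if_neg (by rw [hgd]; exact not_not_intro hb), hdrop]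
        rw [show pvGoInner total (lines[i] :: lines.drop (i + 1))
              = (total, lines[i] :: lines.drop (i + 1)) by simp [pvGoInner, hb]]
        refine Prod.ext rfl ?_
        simp only [List.length_cons, List.length_drop]
        omega
      · rw [pvInner, if_pos h, if_pos (by rw [hgd]; exact hb), hgd, hdrop]
        rw [show pvGoInner total (lines[i] :: lines.drop (i + 1))
              = pvGoInner (total + pvParse lines[i]) (lines.drop (i + 1)) by
          simp [pvGoInner, hb]]
        exact ih (i + 1) (total + pvParse lines[i]) h (by omega)
    · have : i = lines.length := by omega
      subst this
      rw [pvInner, if_neg (by omega)]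
      simp [pvGoInner]

theorem pvSuffixDrop {α : Type} (rest ls : List α) (h : rest <:+ ls) :
    ls.drop (ls.length - rest.length) = rest := by
  obtain ⟨pre, rfl⟩ := h
  rw [show (pre ++ rest).length - rest.length = pre.length by simp, List.drop_left]

-- Bridge 2: with enough fuel, pvOuter computes pvGoOuter on the suffix starting at i
theorem pvOuter_eq_goOuter (lines : List String) (fuel i : Nat)
    (hi : i ≤ lines.length) (hf : lines.length ≤ fuel + i) :
    pvOuter lines fuel i = pvGoOuter (lines.drop i) := by
  induction fuel generalizing i with
  | zero =>
    have : i = lines.length := by omega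
    subst this
    simp [pvOuter, pvGoOuter]
  | succ fuel ih =>
    rcases Nat.lt_or_ge i lines.length with h | h
    · have hdrop : lines.drop i = lines[i] :: lines.drop (i + 1) := (List.getElem_cons_drop h).symm
      have hgd : lines.getD i "" = lines[i] := List.getD_eq_getElem lines "" h
      by_cases hb : lines[i] = ""
      · rw [pvOuter, if_pos h, if_neg (by rw [hgd]; exact not_not_intro hb), hdrop, pvGoOuter]
        simp only [hb, ne_eq, not_true_eq_false, dite_false]
        exact ih (i + 1) h (by omega)
      · have hlt : (pvGoInner 0 (lines.drop i)).2.length < lines.length - i := by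
          have := pvGoInner_cons_lt 0 lines[i] (lines.drop (i + 1)) hb
          rw [← hdrop] at this
          simpa using this
        have hsufall : (pvGoInner 0 (lines.drop i)).2 <:+ lines :=
          (pvGoInner_suffix 0 _).trans (List.drop_suffix i lines)
        have hdropeq : lines.drop (lines.length - (pvGoInner 0 (lines.drop i)).2.length)
            = (pvGoInner 0 (lines.drop i)).2 := pvSuffixDrop _ _ hsufall
        have hrec := ih (lines.length - (pvGoInner 0 (lines.drop i)).2.length)
          (by omega) (by omega)
        rw [hdropeq] at hrec
        rw [pvOuter, if_pos h, if_pos (by rw [hgd]; exact hb)]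
        rw [pvInner_eq_goInner lines lines.length i 0 hi (by omega)]
        conv_rhs => rw [hdrop, pvGoOuter]
        simp only [hb, ne_eq, not_false_iff, dite_true]
        rw [← hdrop, hrec]
    · have : i = lines.length := by omega
      subst this
      rw [pvOuter, if_neg (by omega)]
      simp [pvGoOuter]

-- A's finalizer
def pvFinA (st : List String × List Int) : List Int :=
  if st.1 ≠ [] then st.2 ++ [(st.1.map pvParse).sum] else st.2

-- main invariant: A's fold over the raw lines computes pvGoOuter on the stripped lines,
-- with a pending (possibly empty) batch b and already-emitted sums cal
theorem pvFoldA_eq (raws : List String) (b : List String) (cal : List Int) :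
    pvFinA (raws.foldl pvStepA (b, cal)) =
      cal ++ (if b = [] then pvGoOuter (raws.map PySem.Str.strip)
              else
                (pvGoInner ((b.map pvParse).sum) (raws.map PySem.Str.strip)).1 ::
                  pvGoOuter (pvGoInner ((b.map pvParse).sum) (raws.map PySem.Str.strip)).2) := by
  induction raws generalizing b cal with
  | nil =>
    by_cases hb : b = [] <;> simp [pvFinA, hb, pvGoInner, pvGoOuter]
  | cons raw raws ih =>
    by_cases hl : PySem.Str.strip raw = ""
    · by_cases hb : b = []
      · subst hb
        rw [List.foldl_cons, show pvStepA ([], cal) raw = ([], cal) by simp [pvStepA, hl], ih [] cal]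
        simp [List.map_cons, hl, pvGoOuter]
      · rw [List.foldl_cons,
          show pvStepA (b, cal) raw = ([], cal ++ [(b.map pvParse).sum]) by simp [pvStepA, hl, hb],
          ih [] (cal ++ [(b.map pvParse).sum])]
        simp only [hb, if_false, List.map_cons, hl]
        rw [show pvGoInner ((b.map pvParse).sum) ("" :: raws.map PySem.Str.strip)
              = ((b.map pvParse).sum, "" :: raws.map PySem.Str.strip) by simp [pvGoInner]]
        rw [show pvGoOuter ("" :: raws.map PySem.Str.strip) = pvGoOuter (raws.map PySem.Str.strip) by
          rw [pvGoOuter]; simp]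
        simp [List.append_assoc]
    · rw [List.foldl_cons,
        show pvStepA (b, cal) raw = (b ++ [PySem.Str.strip raw], cal) by simp [pvStepA, hl],
        ih (b ++ [PySem.Str.strip raw]) cal]
      by_cases hb : b = []
      · subst hb
        simp only [List.nil_append, List.map_cons, List.map_nil, List.sum_nil]
        rw [show pvGoOuter (PySem.Str.strip raw :: raws.map PySem.Str.strip)
              = (pvGoInner 0 (PySem.Str.strip raw :: raws.map PySem.Str.strip)).1
                :: pvGoOuter (pvGoInner 0 (PySem.Str.strip raw :: raws.map PySem.Str.strip)).2 by
          rw [pvGoOuter]; simp [hl]]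
        rw [show pvGoInner 0 (PySem.Str.strip raw :: raws.map PySem.Str.strip)
              = pvGoInner (0 + pvParse (PySem.Str.strip raw)) (raws.map PySem.Str.strip) by
          simp [pvGoInner, hl]]
        simp
      · simp only [hb, if_false, List.map_cons]
        rw [show pvGoInner ((b.map pvParse).sum) (PySem.Str.strip raw :: raws.map PySem.Str.strip)
              = pvGoInner ((b.map pvParse).sum + pvParse (PySem.Str.strip raw))
                  (raws.map PySem.Str.strip) by simp [pvGoInner, hl]]
        simp

-- ===== VERDICT (by name: the statement is the Claim_ definition above) =====
theorem count_calories_spec : Claim_equal_count_calories := by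
  intro input_data _ _
  show count_calories input_data = count_calories_alt input_data
  unfold count_calories count_calories_alt
  have h := pvFoldA_eq (PySem.Str.splitlines input_data) [] []
  simp only [List.nil_append] at h
  simp only [pvFinA] at h
  rw [h, pvOuter_eq_goOuter _ _ 0 (Nat.zero_le _) (by omega)]
  simp
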